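-- pv_equiv track=rewrite | github.com/mireiahernandez/icd-continuous-prediction | training/trainer.py | _get_cutoffs
-- ===== SOURCE A (Python) =====
-- def _get_cutoffs(hours_elapsed, category_ids):
--     cutoffs = {"2d": -1, "5d": -1, "13d": -1, "noDS": -1, "all": -1}
--     for i, (hour, cat) in enumerate(zip(hours_elapsed, category_ids)):
--         if cat != 5:
--             if hour < 2 * 24:
--                 cutoffs["2d"] = i
--             if hour < 5 * 24:
--                 cutoffs["5d"] = i
--             if hour < 13 * 24:
--                 cutoffs["13d"] = i
--             cutoffs["noDS"] = i
--         # cutoffs['all'] = i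
--     return cutoffs
-- ===== SOURCE B (Python) =====
-- def _get_cutoffs(hours_elapsed, category_ids):
--     pairs = list(enumerate(zip(hours_elapsed, category_ids)))
--
--     def last_idx(pred):
--         return max((i for i, (h, c) in pairs if c != 5 and pred(h)), default=-1)
--
--     return {
--         "2d": last_idx(lambda h: h < 48),
--         "5d": last_idx(lambda h: h < 120),
--         "13d": last_idx(lambda h: h < 312),
--         "noDS": last_idx(lambda h: True),
--         "all": -1,
--     }
-- ===== Notes on version B (the rewrite author's own statement) =====
-- stated objective: simpler
-- what changed: Replaces the single interleaved loop that mutates four dict entries with one independent filtered max-over-indices pass per cutoff (max(..., default=-1)), assembling the dict at the end.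
import Mathlib
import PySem

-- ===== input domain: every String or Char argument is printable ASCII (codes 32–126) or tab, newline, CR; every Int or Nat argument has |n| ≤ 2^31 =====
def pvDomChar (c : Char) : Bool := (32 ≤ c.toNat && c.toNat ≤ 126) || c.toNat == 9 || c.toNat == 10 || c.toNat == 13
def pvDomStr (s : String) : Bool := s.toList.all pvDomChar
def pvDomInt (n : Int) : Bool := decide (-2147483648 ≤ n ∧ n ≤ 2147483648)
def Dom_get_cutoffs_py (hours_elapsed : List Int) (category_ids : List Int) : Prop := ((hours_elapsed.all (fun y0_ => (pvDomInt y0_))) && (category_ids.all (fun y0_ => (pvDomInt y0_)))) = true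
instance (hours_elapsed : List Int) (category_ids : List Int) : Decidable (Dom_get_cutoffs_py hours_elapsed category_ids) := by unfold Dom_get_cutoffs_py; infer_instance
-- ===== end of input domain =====

-- B computes each cutoff by its own filtered max-over-indices pass instead of A's interleaved mutating loop (objective: simpler).

-- ===== PORT A =====
def get_cutoffs_py (hours_elapsed : List Int) (category_ids : List Int) : List (String × Int) :=
  ((PySem.List.enumerate (hours_elapsed.zip category_ids)).foldl
    (fun (d : PySem.Dict String Int) p =>
      if p.2.2 ≠ 5 then
        let d := if p.2.1 < 2 * 24 then d.insert "2d" p.1 else d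
        let d := if p.2.1 < 5 * 24 then d.insert "5d" p.1 else d
        let d := if p.2.1 < 13 * 24 then d.insert "13d" p.1 else d
        d.insert "noDS" p.1
      else d)
    (PySem.Dict.ofList [("2d", -1), ("5d", -1), ("13d", -1), ("noDS", -1), ("all", -1)])).items

-- ===== PORT B =====
-- max((i for i, (h, c) in pairs if c != 5 and pred(h)), default=-1)
def lastIdxAlt (pairs : List (Int × Int × Int)) (pred : Int → Bool) : Int :=
  ((pairs.filter (fun p => p.2.2 != 5 && pred p.2.1)).map (·.1)).foldl max (-1)

def get_cutoffs_py_alt (hours_elapsed : List Int) (category_ids : List Int) : List (String × Int) :=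
  let pairs := PySem.List.enumerate (hours_elapsed.zip category_ids)
  [("2d", lastIdxAlt pairs (fun h => h < 48)),
   ("5d", lastIdxAlt pairs (fun h => h < 120)),
   ("13d", lastIdxAlt pairs (fun h => h < 312)),
   ("noDS", lastIdxAlt pairs (fun _ => true)),
   ("all", -1)]

-- ===== PRECONDITION & SPEC =====
def Spec_get_cutoffs_py (hours_elapsed : List Int) (category_ids : List Int) (out : List (String × Int)) : Prop := out = get_cutoffs_py_alt hours_elapsed category_ids
instance (hours_elapsed : List Int) (category_ids : List Int) (out : List (String × Int)) : Decidable (Spec_get_cutoffs_py hours_elapsed category_ids out) := by unfold Spec_get_cutoffs_py; infer_instance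

-- ===== CLAIM (what is proved, stated in full; the proofs are below) =====
def Claim_equal_get_cutoffs_py : Prop := ∀ (hours_elapsed : List Int) (category_ids : List Int), Dom_get_cutoffs_py hours_elapsed category_ids → Spec_get_cutoffs_py hours_elapsed category_ids (get_cutoffs_py hours_elapsed category_ids)

-- ===== LEMMAS AND PROOFS =====

-- the five-key dict A maintains, by value
def dictOf (a b c d e : Int) : PySem.Dict String Int :=
  PySem.Dict.ofList [("2d", a), ("5d", b), ("13d", c), ("noDS", d), ("all", e)]

theorem dictOf_insert_2d (a b c d e x : Int) : (dictOf a b c d e).insert "2d" x = dictOf x b c d e := rfl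
theorem dictOf_insert_5d (a b c d e x : Int) : (dictOf a b c d e).insert "5d" x = dictOf a x c d e := rfl
theorem dictOf_insert_13d (a b c d e x : Int) : (dictOf a b c d e).insert "13d" x = dictOf a b x d e := rfl
theorem dictOf_insert_noDS (a b c d e x : Int) : (dictOf a b c d e).insert "noDS" x = dictOf a b c x e := rfl

-- the one-key scalar version of A's update
def lastIdxA (pairs : List (Int × Int × Int)) (pred : Int → Bool) (m : Int) : Int :=
  pairs.foldl (fun m p => if p.2.2 ≠ 5 ∧ pred p.2.1 then p.1 else m) m

theorem lastIdxA_cons (p : Int × Int × Int) (ps : List (Int × Int × Int)) (pred : Int → Bool) (m : Int) :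
    lastIdxA (p :: ps) pred m = lastIdxA ps pred (if p.2.2 ≠ 5 ∧ pred p.2.1 then p.1 else m) := rfl

-- one step of A's loop, written on the decomposed state
theorem foldA_step (a b c d s h1 c1 : Int) :
    (if (s, h1, c1).2.2 ≠ 5 then
        let e1 := if (s, h1, c1).2.1 < 2 * 24 then (dictOf a b c d (-1)).insert "2d" (s, h1, c1).1
                  else dictOf a b c d (-1)
        let e2 := if (s, h1, c1).2.1 < 5 * 24 then e1.insert "5d" (s, h1, c1).1 else e1
        let e3 := if (s, h1, c1).2.1 < 13 * 24 then e2.insert "13d" (s, h1, c1).1 else e2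
        e3.insert "noDS" (s, h1, c1).1
      else dictOf a b c d (-1))
    = dictOf (if c1 ≠ 5 ∧ decide (h1 < 48) = true then s else a)
             (if c1 ≠ 5 ∧ decide (h1 < 120) = true then s else b)
             (if c1 ≠ 5 ∧ decide (h1 < 312) = true then s else c)
             (if c1 ≠ 5 ∧ (true : Bool) = true then s else d)
             (-1) := by
  by_cases h5 : c1 ≠ 5 <;> by_cases hx : h1 < 48 <;> by_cases hy : h1 < 120 <;> by_cases hz : h1 < 312 <;>
    first
      | exact absurd hy (by omega)
      | exact absurd hz (by omega)
      | simp [h5, hx, hy, hz, dictOf_insert_2d, dictOf_insert_5d,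
          dictOf_insert_13d, dictOf_insert_noDS]

-- A's interleaved dict fold decomposes into four independent scalar folds
theorem foldA_eq_dictOf (xs : List (Int × Int)) : ∀ (s a b c d : Int),
    (PySem.List.enumerate xs s).foldl
      (fun (d : PySem.Dict String Int) p =>
        if p.2.2 ≠ 5 then
          let d := if p.2.1 < 2 * 24 then d.insert "2d" p.1 else d
          let d := if p.2.1 < 5 * 24 then d.insert "5d" p.1 else d
          let d := if p.2.1 < 13 * 24 then d.insert "13d" p.1 else d
          d.insert "noDS" p.1
        else d)
      (dictOf a b c d (-1))
    = dictOf (lastIdxA (PySem.List.enumerate xs s) (fun h => h < 48) a)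
             (lastIdxA (PySem.List.enumerate xs s) (fun h => h < 120) b)
             (lastIdxA (PySem.List.enumerate xs s) (fun h => h < 312) c)
             (lastIdxA (PySem.List.enumerate xs s) (fun _ => true) d)
             (-1) := by
  induction xs with
  | nil => intro s a b c d; simp [PySem.List.enumerate, lastIdxA]
  | cons x xs ih =>
    intro s a b c d
    obtain ⟨h1, c1⟩ := x
    rw [PySem.List.enumerate_cons, List.foldl_cons, foldA_step, lastIdxA_cons,
      lastIdxA_cons, lastIdxA_cons, lastIdxA_cons]
    exact ih (s + 1) _ _ _ _

-- the scalar last-match fold is the max over the filtered indices (indices are increasing)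
theorem lastIdxA_eq_max (xs : List (Int × Int)) (pred : Int → Bool) : ∀ (s m : Int), m < s →
    lastIdxA (PySem.List.enumerate xs s) pred m
      = (((PySem.List.enumerate xs s).filter (fun p => p.2.2 != 5 && pred p.2.1)).map (·.1)).foldl max m := by
  induction xs with
  | nil => intro s m _; simp [PySem.List.enumerate, lastIdxA]
  | cons x xs ih =>
    intro s m hms
    rw [PySem.List.enumerate_cons, lastIdxA_cons]
    by_cases hc : (s, x).2.2 ≠ 5 ∧ pred (s, x).2.1 = true
    · have hb : ((s, x).2.2 != 5 && pred (s, x).2.1) = true := by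
        simp only [Bool.and_eq_true, bne_iff_ne]
        exact ⟨hc.1, hc.2⟩
      rw [if_pos hc, List.filter_cons, if_pos hb, List.map_cons, List.foldl_cons,
        show max m s = s from by omega]
      exact ih (s + 1) s (by omega)
    · have hb : ¬ ((s, x).2.2 != 5 && pred (s, x).2.1) = true := by
        simp only [Bool.and_eq_true, bne_iff_ne]
        exact hc
      rw [if_neg hc, List.filter_cons, if_neg hb]
      exact ih (s + 1) m (by omega)

-- ===== VERDICT (by name: the statement is the Claim_ definition above) =====
theorem get_cutoffs_py_spec : Claim_equal_get_cutoffs_py := by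
  intro hours cats _
  unfold Spec_get_cutoffs_py get_cutoffs_py get_cutoffs_py_alt lastIdxAlt
  rw [show (PySem.Dict.ofList [("2d", (-1 : Int)), ("5d", -1), ("13d", -1), ("noDS", -1), ("all", -1)]) = dictOf (-1) (-1) (-1) (-1) (-1) from rfl]
  rw [foldA_eq_dictOf (hours.zip cats) 0 (-1) (-1) (-1) (-1)]
  rw [lastIdxA_eq_max _ _ 0 (-1) (by omega), lastIdxA_eq_max _ _ 0 (-1) (by omega),
      lastIdxA_eq_max _ _ 0 (-1) (by omega), lastIdxA_eq_max _ _ 0 (-1) (by omega)]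
  rfl
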